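-- pv_equiv track=rewrite | github.com/mluettecke/programming-challenges | advent-of-code/2020/06/day06.py | part_two
-- ===== SOURCE A (Python) =====
-- def part_two(input_data):
--     """
--     """
--     sum_of_answers = 0
--     for group in input_data:
--         # ugly af
--         intersection = {"a", "b", "c", "d", "e", "f", "g", "h", "i", "j", "k", "l",
--                         "m", "n", "o", "p", "q", "r", "s", "t", "u", "v", "w", "x", "y", "z"}
--         for person in group:
--             answers = set()
--             for answer in person:
--                 answers.add(answer)
--             intersection = intersection.intersection(answers)
--         sum_of_answers = sum_of_answers + len(intersection)
--     return sum_of_answers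
-- ===== SOURCE B (Python) =====
-- ALPHABET = "abcdefghijklmnopqrstuvwxyz"
--
--
-- def part_two(input_data):
--     return sum(
--         sum(1 for c in ALPHABET if all(c in person for person in group))
--         for group in input_data
--     )
-- ===== Notes on version B (the rewrite author's own statement) =====
-- stated objective: idiomatic
-- what changed: Instead of maintaining a running-intersection set over persons and summing its size, B flips the nesting: for each group it counts, over the fixed 26-letter alphabet, the letters contained in every person via all() over the group, with nested generator expressions and no set objects built or intersected.
import Mathlib
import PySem

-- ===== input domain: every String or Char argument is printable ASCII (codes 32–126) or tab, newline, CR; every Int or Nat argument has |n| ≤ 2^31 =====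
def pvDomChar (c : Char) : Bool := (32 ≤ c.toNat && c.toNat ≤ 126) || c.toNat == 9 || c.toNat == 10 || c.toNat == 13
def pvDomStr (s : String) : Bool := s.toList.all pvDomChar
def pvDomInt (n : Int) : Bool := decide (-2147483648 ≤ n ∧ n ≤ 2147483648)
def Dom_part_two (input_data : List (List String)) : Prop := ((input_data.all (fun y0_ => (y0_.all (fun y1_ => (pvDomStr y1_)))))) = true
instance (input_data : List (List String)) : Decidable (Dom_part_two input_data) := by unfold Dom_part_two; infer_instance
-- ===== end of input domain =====

-- B flips the nesting: instead of maintaining a running-intersection set per group,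
-- it counts, over the fixed alphabet, the letters contained in every person (idiomatic).

-- ===== PORT A =====
def pvAlphabet : List Char := "abcdefghijklmnopqrstuvwxyz".toList

def part_two (input_data : List (List String)) : Int :=
  input_data.foldl
    (fun sum_of_answers group =>
      let intersection := group.foldl
        (fun intersection person =>
          let answers := person.toList.foldl (fun s a => PySem.Set.add s a) PySem.Set.empty
          PySem.Set.inter intersection answers)
        (PySem.Set.ofList pvAlphabet)
      sum_of_answers + PySem.Set.len intersection)
    0

-- ===== PORT B =====
def part_two_alt (input_data : List (List String)) : Int :=
  (input_data.map (fun group =>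
      ((pvAlphabet.countP
          (fun c => group.all (fun person => person.toList.contains c)) : Nat) : Int))).sum

-- ===== PRECONDITION & SPEC =====
def Spec_part_two (input_data : List (List String)) (out : Int) : Prop := out = part_two_alt input_data
instance (input_data : List (List String)) (out : Int) : Decidable (Spec_part_two input_data out) := by unfold Spec_part_two; infer_instance

-- ===== CLAIM (what is proved, stated in full; the proofs are below) =====
def Claim_equal_part_two : Prop := ∀ (input_data : List (List String)), Dom_part_two input_data → Spec_part_two input_data (part_two input_data)

-- ===== LEMMAS AND PROOFS =====

-- the intersection loop over a group leaves exactly the letters of s contained in every person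
lemma inter_foldl_eq_filter (group : List String) (s : PySem.Set Char) :
    group.foldl
      (fun intersection person =>
        PySem.Set.inter intersection
          (person.toList.foldl (fun s a => PySem.Set.add s a) PySem.Set.empty))
      s
    = s.filter (fun c => group.all (fun person => person.toList.contains c)) := by
  induction group generalizing s with
  | nil => simp
  | cons p gs ih =>
    rw [List.foldl_cons, ih]
    simp only [PySem.Set.inter, List.filter_filter]
    refine List.filter_congr (fun c _ => ?_)
    have hmem : c ∈ p.toList.foldl (fun s a => PySem.Set.add s a) ([] : PySem.Set Char)
        ↔ c ∈ p.toList := by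
      rw [show p.toList.foldl (fun s a => PySem.Set.add s a) ([] : PySem.Set Char)
            = PySem.Set.ofList p.toList from rfl]
      exact PySem.Set.mem_ofList (xs := p.toList) (y := c)
    simp [hmem, List.all_cons, PySem.Set.contains_eq_listContains, Bool.and_comm]

lemma group_count (group : List String) :
    PySem.Set.len
      (group.foldl
        (fun intersection person =>
          PySem.Set.inter intersection
            (person.toList.foldl (fun s a => PySem.Set.add s a) PySem.Set.empty))
        (PySem.Set.ofList pvAlphabet))
    = ((pvAlphabet.countP
        (fun c => group.all (fun person => person.toList.contains c)) : Nat) : Int) := by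
  rw [inter_foldl_eq_filter]
  have halpha : PySem.Set.ofList pvAlphabet = pvAlphabet :=
    PySem.Set.ofList_eq_self_of_nodup _ (by decide)
  rw [halpha]
  simp [PySem.Set.len, List.countP_eq_length_filter]

lemma foldl_add_counts (input_data : List (List String)) (acc : Int) :
    input_data.foldl
      (fun sum_of_answers group =>
        sum_of_answers +
          PySem.Set.len
            (group.foldl
              (fun intersection person =>
                PySem.Set.inter intersection
                  (person.toList.foldl (fun s a => PySem.Set.add s a) PySem.Set.empty))
              (PySem.Set.ofList pvAlphabet)))
      acc
    = acc + (input_data.map (fun group =>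
        ((pvAlphabet.countP
            (fun c => group.all (fun person => person.toList.contains c)) : Nat) : Int))).sum := by
  induction input_data generalizing acc with
  | nil => simp
  | cons g gs ih =>
    rw [List.foldl_cons, ih, List.map_cons, List.sum_cons, group_count]
    ring

-- ===== VERDICT (by name: the statement is the Claim_ definition above) =====
theorem part_two_spec : Claim_equal_part_two := by
  intro input_data _
  show part_two input_data = part_two_alt input_data
  unfold part_two part_two_alt
  simpa using foldl_add_counts input_data 0
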